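-- pv_equiv track=rewrite | github.com/edri2or/ripo-skills-main | scripts/check_policies.py | check_adr
-- ===== SOURCE A (Python) =====
-- def check_adr(changed: list[str]) -> list[str]:
--     arch_exact = {
--         "package.json", "package-lock.json", "yarn.lock",
--         "go.mod", "go.sum", "requirements.txt", "Pipfile",
--     }
--     arch_prefixes = ["terraform/", "infra/", "k8s/", "helm/", ".github/workflows/"]
--
--     def is_arch(f: str) -> bool:
--         return f in arch_exact or any(f.startswith(p) for p in arch_prefixes)
--
--     def is_new_adr(f: str) -> bool:
--         return f.startswith("docs/adr/") and f.endswith(".md") and f != "docs/adr/README.md"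
--
--     first_arch = next((f for f in changed if is_arch(f)), None)
--     if first_arch and not any(is_new_adr(f) for f in changed):
--         return [
--             f"[adr] Architectural change detected (e.g. '{first_arch}') but "
--             "no new ADR was added in 'docs/adr/'. Please create an Architecture "
--             "Decision Record following the format in docs/adr/README.md."
--         ]
--     return []
-- ===== SOURCE B (Python) =====
-- ARCH_NAMES = [
--     "package.json", "package-lock.json", "yarn.lock",
--     "go.mod", "go.sum", "requirements.txt", "Pipfile",
-- ]
-- ARCH_PREFIXES = ["terraform/", "infra/", "k8s/", "helm/", ".github/workflows/"]
--
-- MSG = ("[adr] Architectural change detected (e.g. '{}') but "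
--        "no new ADR was added in 'docs/adr/'. Please create an Architecture "
--        "Decision Record following the format in docs/adr/README.md.")
--
--
-- def _prefix_hit(f, prefixes):
--     if not prefixes:
--         return False
--     return f.startswith(prefixes[0]) or _prefix_hit(f, prefixes[1:])
--
--
-- def _is_arch(f):
--     return any(f == name for name in ARCH_NAMES) or _prefix_hit(f, ARCH_PREFIXES)
--
--
-- def _is_new_adr(f):
--     if not f.startswith("docs/adr/"):
--         return False
--     if not f.endswith(".md"):
--         return False
--     return f != "docs/adr/README.md"
--
--
-- def _warn_first_arch(files):
--     # emit the warning for the first architectural file, if any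
--     for f in files:
--         if _is_arch(f):
--             return [MSG.format(f)]
--     return []
--
--
-- def check_adr(changed: list[str]) -> list[str]:
--     # If a new ADR is present, everything is fine regardless of arch changes.
--     for f in changed:
--         if _is_new_adr(f):
--             return []
--     return _warn_first_arch(changed)
-- ===== Notes on version B (the rewrite author's own statement) =====
-- stated objective: alternative
-- what changed: Inverts the control flow: B first scans for a new ADR and exits early with no warnings if one exists, then a separate scan emits the warning at the first architectural file; A instead finds the first architectural file with next(...) and only then checks any(is_new_adr).
import Mathlib
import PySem

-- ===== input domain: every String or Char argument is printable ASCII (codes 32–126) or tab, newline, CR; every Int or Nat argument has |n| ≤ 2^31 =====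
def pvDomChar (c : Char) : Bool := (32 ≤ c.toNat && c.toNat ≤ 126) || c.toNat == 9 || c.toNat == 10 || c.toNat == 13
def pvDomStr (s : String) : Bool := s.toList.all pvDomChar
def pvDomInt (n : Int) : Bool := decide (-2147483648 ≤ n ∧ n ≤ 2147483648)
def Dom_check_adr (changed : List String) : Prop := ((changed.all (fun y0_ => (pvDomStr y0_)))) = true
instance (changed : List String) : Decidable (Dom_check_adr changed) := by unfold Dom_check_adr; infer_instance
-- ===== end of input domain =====

-- ===== PORT A =====
-- A: next(...) to find the first architectural file, then any(is_new_adr) over the whole list.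
-- B: early return [] as soon as a new ADR is seen, else a recursive scan warning at the first
-- architectural file (alternative decomposition, same cost; return value only, no side effects).
def pvIsArch (f : String) : Bool :=
  (f == "package.json" || f == "package-lock.json" || f == "yarn.lock" ||
   f == "go.mod" || f == "go.sum" || f == "requirements.txt" || f == "Pipfile")
  || (["terraform/", "infra/", "k8s/", "helm/", ".github/workflows/"].any
        (fun p => PySem.Str.startswith f p))

def pvIsNewAdr (f : String) : Bool :=
  PySem.Str.startswith f "docs/adr/" && PySem.Str.endswith f ".md" && f != "docs/adr/README.md"

def pvMsg (firstArch : String) : String :=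
  "[adr] Architectural change detected (e.g. '" ++ firstArch ++
  "') but no new ADR was added in 'docs/adr/'. Please create an Architecture " ++
  "Decision Record following the format in docs/adr/README.md."

def check_adr (changed : List String) : List String :=
  match changed.find? pvIsArch with
  | some firstArch =>
      -- Python truthiness of `first_arch`: non-None AND non-empty string
      if firstArch != "" && !(changed.any pvIsNewAdr) then [pvMsg firstArch] else []
  | none => []

-- ===== PORT B =====
-- Source B's _prefix_hit: explicit recursion over the prefix list
def bPrefixHit (f : String) : List String → Bool
  | [] => false
  | p :: ps => PySem.Str.startswith f p || bPrefixHit f ps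

def bIsArch (f : String) : Bool :=
  (["package.json", "package-lock.json", "yarn.lock",
    "go.mod", "go.sum", "requirements.txt", "Pipfile"].any (fun name => f == name))
  || bPrefixHit f ["terraform/", "infra/", "k8s/", "helm/", ".github/workflows/"]

def bIsNewAdr (f : String) : Bool :=
  if !PySem.Str.startswith f "docs/adr/" then false
  else if !PySem.Str.endswith f ".md" then false
  else f != "docs/adr/README.md"

-- Source B's _warn_first_arch: recursive scan emitting the message at the first arch file
def bWarnFirstArch : List String → List String
  | [] => []
  | f :: fs => if bIsArch f then [pvMsg f] else bWarnFirstArch fs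

-- Source B's check_adr: early-exit loop for a new ADR, else the recursive warning scan
def bAdrLoop : List String → Bool
  | [] => false
  | f :: fs => if bIsNewAdr f then true else bAdrLoop fs

def check_adr_alt (changed : List String) : List String :=
  if bAdrLoop changed then [] else bWarnFirstArch changed

-- ===== PRECONDITION & SPEC =====
def Spec_check_adr (changed : List String) (out : List String) : Prop := out = check_adr_alt changed
instance (changed : List String) (out : List String) : Decidable (Spec_check_adr changed out) := by unfold Spec_check_adr; infer_instance

-- ===== CLAIM (what is proved, stated in full; the proofs are below) =====
def Claim_equal_check_adr : Prop := ∀ (changed : List String), Dom_check_adr changed → Spec_check_adr changed (check_adr changed)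

-- ===== LEMMAS AND PROOFS =====
lemma bIsArch_eq (f : String) : bIsArch f = pvIsArch f := by
  simp [bIsArch, pvIsArch, bPrefixHit, Bool.or_assoc]

lemma bIsNewAdr_eq (f : String) : bIsNewAdr f = pvIsNewAdr f := by
  simp [bIsNewAdr, pvIsNewAdr, Bool.and_assoc]

lemma bAdrLoop_eq (l : List String) : bAdrLoop l = l.any pvIsNewAdr := by
  induction l with
  | nil => rfl
  | cons f fs ih =>
      by_cases h : pvIsNewAdr f = true <;>
        simp [bAdrLoop, bIsNewAdr_eq, h, ih]

lemma bWarnFirstArch_eq (l : List String) :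
    bWarnFirstArch l = match l.find? pvIsArch with
      | some a => [pvMsg a]
      | none => [] := by
  induction l with
  | nil => rfl
  | cons f fs ih =>
      by_cases h : pvIsArch f = true
      · simp [bWarnFirstArch, bIsArch_eq, h, List.find?_cons_of_pos]
      · rw [List.find?_cons_of_neg h]
        simp [bWarnFirstArch, bIsArch_eq, h, ih]

lemma pvIsArch_ne_empty {f : String} (h : pvIsArch f = true) : (f != "") = true := by
  by_cases he : f = ""
  · subst he; exact absurd h (by decide)
  · simp [he]

-- ===== VERDICT (by name: the statement is the Claim_ definition above) =====
theorem check_adr_spec : Claim_equal_check_adr := by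
  intro changed _
  unfold Spec_check_adr check_adr check_adr_alt
  rw [bAdrLoop_eq, bWarnFirstArch_eq]
  cases hf : changed.find? pvIsArch with
  | none => simp
  | some a =>
      have ha : pvIsArch a = true := List.find?_some hf
      by_cases h : changed.any pvIsNewAdr = true <;>
        simp [h, pvIsArch_ne_empty ha]
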